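-- pv_equiv track=rewrite | github.com/Seb010/Python-Password-Checker | password.py | check_if_there_are_consecutive_lowercase_letters
-- ===== SOURCE A (Python) =====
-- def check_if_there_are_consecutive_lowercase_letters(input):
--     counter = 0
--     for i in input:
--         if counter == 3:
--             return True
--         if i.islower():
--             counter = counter + 1
--         else:
--             counter = 0
--     if counter == 3:
--         return True
--     return False
-- ===== SOURCE B (Python) =====
-- def check_if_there_are_consecutive_lowercase_letters(input):
--     return any(a.islower() and b.islower() and c.islower()
--                for a, b, c in zip(input, input[1:], input[2:]))
-- ===== Notes on version B (the rewrite author's own statement) =====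
-- stated objective: idiomatic
-- what changed: Replaces the resetting counter with early returns by a single any() over sliding 3-character windows (zip of the string with its two shifted slices).
import Mathlib
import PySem

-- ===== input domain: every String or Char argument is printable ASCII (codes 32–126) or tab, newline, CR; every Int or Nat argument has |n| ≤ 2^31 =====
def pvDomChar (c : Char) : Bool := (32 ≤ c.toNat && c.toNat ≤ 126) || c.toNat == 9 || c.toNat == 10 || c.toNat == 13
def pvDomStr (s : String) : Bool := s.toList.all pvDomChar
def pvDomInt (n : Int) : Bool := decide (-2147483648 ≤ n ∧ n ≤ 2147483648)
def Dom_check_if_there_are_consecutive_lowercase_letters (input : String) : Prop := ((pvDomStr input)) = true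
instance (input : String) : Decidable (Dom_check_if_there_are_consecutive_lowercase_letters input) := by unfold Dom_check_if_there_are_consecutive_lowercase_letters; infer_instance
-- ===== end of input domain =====

-- B replaces A's resetting counter and early returns by one pass over sliding
-- 3-character windows (zip of the string with its two shifted slices); same cost, no speed claim.

-- ===== PORT A =====
-- the for-loop with its `counter` accumulator and early `return True`
def pvALoop (l : List Char) (counter : Nat) : Bool :=
  match l with
  | [] => counter == 3
  | i :: rest =>
    if counter == 3 then true
    else if PySem.Str.islower i then pvALoop rest (counter + 1)
    else pvALoop rest 0

def check_if_there_are_consecutive_lowercase_letters (input : String) : Bool :=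
  pvALoop input.toList 0

-- ===== PORT B =====
-- zip(input, input[1:], input[2:]) over the characters, then any(...)
def check_if_there_are_consecutive_lowercase_letters_alt (input : String) : Bool :=
  let l := input.toList
  (l.zip ((l.drop 1).zip (l.drop 2))).any
    (fun t => PySem.Str.islower t.1 && (PySem.Str.islower t.2.1 && PySem.Str.islower t.2.2))

-- ===== PRECONDITION & SPEC =====
def Spec_check_if_there_are_consecutive_lowercase_letters (input : String) (out : Bool) : Prop := out = check_if_there_are_consecutive_lowercase_letters_alt input
instance (input : String) (out : Bool) : Decidable (Spec_check_if_there_are_consecutive_lowercase_letters input out) := by unfold Spec_check_if_there_are_consecutive_lowercase_letters; infer_instance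

-- ===== CLAIM (what is proved, stated in full; the proofs are below) =====
def Claim_equal_check_if_there_are_consecutive_lowercase_letters : Prop := ∀ (input : String), Dom_check_if_there_are_consecutive_lowercase_letters input → Spec_check_if_there_are_consecutive_lowercase_letters input (check_if_there_are_consecutive_lowercase_letters input)

-- ===== LEMMAS AND PROOFS =====

-- B's window scan, on the character list
def pvBWin (l : List Char) : Bool :=
  (l.zip ((l.drop 1).zip (l.drop 2))).any
    (fun t => PySem.Str.islower t.1 && (PySem.Str.islower t.2.1 && PySem.Str.islower t.2.2))

-- the first k characters exist and are all lowercase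
def pvFirstK : Nat → List Char → Bool
  | 0, _ => true
  | _ + 1, [] => false
  | k + 1, x :: xs => PySem.Str.islower x && pvFirstK k xs

theorem pvBWin_cons3 (a b c : Char) (r : List Char) :
    pvBWin (a :: b :: c :: r) =
      ((PySem.Str.islower a && (PySem.Str.islower b && PySem.Str.islower c)) || pvBWin (b :: c :: r)) := by
  simp [pvBWin]

theorem pvALoop_three (l : List Char) : pvALoop l 3 = true := by
  cases l <;> simp [pvALoop]

theorem pvFirstK3_bWin (l : List Char) (h : pvFirstK 3 l = true) : pvBWin l = true := by
  match l with
  | [] => simp [pvFirstK] at h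
  | [a] => simp [pvFirstK] at h
  | [a, b] => simp [pvFirstK] at h
  | a :: b :: c :: r =>
    rw [pvBWin_cons3]
    simp [pvFirstK] at h
    simp [h.1, h.2.1, h.2.2]

theorem pvMain (l : List Char) : ∀ c : Nat, c ≤ 2 →
    pvALoop l c = (pvFirstK (3 - c) l || pvBWin l) := by
  induction l with
  | nil =>
    intro c hc
    interval_cases c <;> simp [pvALoop, pvFirstK, pvBWin]
  | cons x xs ih =>
    intro c hc
    by_cases hx : PySem.Str.islower x = true
    · rcases Nat.lt_or_ge c 2 with hlt | hge
      · have h1 : c + 1 ≤ 2 := hlt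
        have h2 : 3 - c = (3 - (c + 1)) + 1 := by omega
        rw [h2]
        have hne : (c == 3) = false := by simp only [beq_eq_false_iff_ne]; omega
        simp only [pvALoop, hne, if_false, hx, if_true, Bool.false_eq_true]
        rw [ih (c + 1) h1]
        simp only [pvFirstK, hx, Bool.true_and]
        have h3 : 3 - (c + 1) ≥ 1 := by omega
        -- absorb B's window at x into the firstK prefix requirement
        match xs, h3 with
        | [], _ => interval_cases c <;> simp [pvFirstK, pvBWin]
        | [b], _ => interval_cases c <;>
            cases hb : PySem.Str.islower b <;> simp [pvFirstK, pvBWin, hb]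
        | b :: c' :: r, _ =>
          rw [pvBWin_cons3, hx]
          interval_cases c <;>
            cases hb : PySem.Str.islower b <;>
            cases hc' : PySem.Str.islower c' <;>
            simp [pvFirstK, hb, hc']
      · have hc2 : c = 2 := by omega
        subst hc2
        simp only [pvALoop, hx]
        norm_num
        rw [pvALoop_three]
        simp [pvFirstK, hx]
    · have hx' : PySem.Str.islower x = false := by
        cases h : PySem.Str.islower x; rfl; exact absurd h hx
      have hne : (c == 3) = false := by simp only [beq_eq_false_iff_ne]; omega
      simp only [pvALoop, hne, if_false, hx', Bool.false_eq_true]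
      rw [ih 0 (by omega)]
      have hz : 3 - c ≥ 1 := by omega
      have hL : pvFirstK (3 - c) (x :: xs) = false := by
        match (3 - c), hz with
        | k + 1, _ => simp [pvFirstK, hx']
      rw [hL]
      simp only [Bool.false_or]
      have hR : pvBWin (x :: xs) = pvBWin xs := by
        match xs with
        | [] => simp [pvBWin]
        | [b] => simp [pvBWin]
        | b :: c' :: r => rw [pvBWin_cons3, hx']; simp
      rw [hR]
      cases h3 : pvFirstK 3 xs
      · simp
      · simp [pvFirstK3_bWin xs h3]

-- ===== VERDICT (by name: the statement is the Claim_ definition above) =====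
theorem check_if_there_are_consecutive_lowercase_letters_spec : Claim_equal_check_if_there_are_consecutive_lowercase_letters := by
  intro input _
  unfold Spec_check_if_there_are_consecutive_lowercase_letters
  show pvALoop input.toList 0 = _
  rw [pvMain input.toList 0 (by omega)]
  have : check_if_there_are_consecutive_lowercase_letters_alt input = pvBWin input.toList := rfl
  rw [this]
  cases h3 : pvFirstK 3 input.toList
  · simp
  · simp [pvFirstK3_bWin _ h3]
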